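-- pv_equiv track=rewrite | github.com/Lee-3-8/CodingTest-Study | level3/표_편집/정한.py | solution
-- ===== SOURCE A (Python) =====
-- def solution(n, k, cmd):
--     li = [i for i in range(n)]
--     idx = k
--     remove_set = []
--     for cm in cmd:
--         cm = cm.split(" ")
--         if cm[0] == "U":
--             idx -= int(cm[1])
--
--         elif cm[0] == "D":
--             idx += int(cm[1])
--
--         elif cm[0] == "C":  # 삭제
--             if idx == len(li) - 1:  # 마지막 행인경우
--                 remove_set.append((li.pop(), idx))
--                 idx -= 1
--             else:
--                 remove_set.append((li[idx], idx))
--                 del li[idx]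
--
--         elif cm[0] == "Z":  # 복구
--             t = remove_set.pop()
--             if t[1] <= idx:
--                 li.insert(t[1], t[0])
--                 idx += 1
--             else:
--                 li.insert(t[1], t[0])
--
--     result = ["X" for _ in range(n)]
--     for i in li:
--         result[i] = "O"
--
--     return "".join(result)
-- ===== SOURCE B (Python) =====
-- def solution(n, k, cmd):
--     # Zipper (two-stack) editor with a lazy cursor: `above` holds the rows above
--     # the cursor in table order, `below` holds the cursor row and the rows under
--     # it stored reversed (cursor row last), and `pend` is the pending cursor
--     # displacement, settled into the stacks only when a delete/restore needs it.
--     above = []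
--     below = list(range(n - 1, -1, -1))
--     pend = k
--     dead = []  # stack of (row, position at deletion time)
--     for c in cmd:
--         t = c.split(" ")
--         if t[0] == "U":
--             pend -= int(t[1])
--         elif t[0] == "D":
--             pend += int(t[1])
--         elif t[0] == "C":
--             _seek(above, below, pend)
--             pend = 0
--             dead.append((below.pop(), len(above)))
--             if not below and above:
--                 below.append(above.pop())
--         elif t[0] == "Z":
--             _seek(above, below, pend)
--             pend = 0
--             v, p = dead.pop()
--             if p <= len(above):
--                 above.insert(p, v)
--             else:
--                 below.insert(len(below) - (p - len(above)), v)
--     out = ["O"] * n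
--     for v, _ in dead:
--         out[v] = "X"
--     return "".join(out)
--
--
-- def _seek(above, below, d):
--     # move the cursor d rows down (negative d: up) between the two stacks
--     while d > 0:
--         above.append(below.pop())
--         d -= 1
--     while d < 0:
--         below.append(above.pop())
--         d += 1
-- ===== Notes on version B (the rewrite author's own statement) =====
-- stated objective: alternative
-- what changed: Replaces A's flat survivor list (index delete/insert on one list, cursor as an integer) by a two-stack zipper with a lazy cursor displacement that is settled into the stacks only at a delete/restore, and builds the output by marking the stack of dead rows over an all-O row instead of marking survivors over an all-X row.
-- outside the precondition, e.g. on solution(2, -1, ['C']): A returns 'OX', B raises IndexError; on solution(2, 0, ['C', 'U 5', 'Z']): A returns 'OO', B raises IndexError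
import Mathlib
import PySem

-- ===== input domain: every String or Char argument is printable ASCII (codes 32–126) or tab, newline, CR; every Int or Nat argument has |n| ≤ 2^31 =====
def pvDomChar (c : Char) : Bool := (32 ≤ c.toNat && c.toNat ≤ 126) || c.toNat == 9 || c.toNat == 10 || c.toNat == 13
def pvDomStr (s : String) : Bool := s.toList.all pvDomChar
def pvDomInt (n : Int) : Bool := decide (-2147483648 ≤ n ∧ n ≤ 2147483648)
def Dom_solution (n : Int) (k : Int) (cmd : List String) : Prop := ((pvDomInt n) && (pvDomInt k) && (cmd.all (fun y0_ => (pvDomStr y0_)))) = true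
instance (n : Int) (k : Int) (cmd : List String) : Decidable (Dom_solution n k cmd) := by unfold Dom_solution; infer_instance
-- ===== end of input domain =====

-- B replaces A's flat survivor list + integer cursor by a two-stack zipper with a lazy
-- cursor displacement, and builds the output from the stack of deleted rows instead of
-- the survivor list (a different data structure and traversal; equal results proved).

-- ===== PORT A =====
def pvRange (n : Int) : List Int := PySem.List.pyRange 0 n 1

-- one iteration of A's `for cm in cmd` loop over the state (li, idx, remove_set)
def pvStepA (st : List Int × Int × List (Int × Int)) (cm : String) : List Int × Int × List (Int × Int) :=
  let li := st.1
  let idx := st.2.1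
  let rs := st.2.2
  let parts := (PySem.Str.split? cm " ").getD []
  let c0 := PySem.List.pyGetD parts 0 ""
  if c0 = "U" then
    -- int(cm[1]): `.getD 0` is unreachable under Pre_ (Python raises there)
    (li, idx - ((PySem.Int.ofStr? (PySem.List.pyGetD parts 1 "")).getD 0), rs)
  else if c0 = "D" then
    (li, idx + ((PySem.Int.ofStr? (PySem.List.pyGetD parts 1 "")).getD 0), rs)
  else if c0 = "C" then
    if idx = (li.length : Int) - 1 then
      -- li.pop(): last element + dropLast (Python raises on empty li: outside Pre_)
      (li.dropLast, idx - 1, rs ++ [(PySem.List.pyGetD li (-1) 0, idx)])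
    else
      -- li[idx] and `del li[idx]`: exact for 0 ≤ idx < len(li), which Pre_ guarantees
      (li.eraseIdx idx.toNat, idx, rs ++ [(PySem.List.pyGetD li idx 0, idx)])
  else if c0 = "Z" then
    -- remove_set.pop(): last element + dropLast (Python raises on empty: outside Pre_)
    let t := PySem.List.pyGetD rs (-1) (0, 0)
    let rs' := rs.dropLast
    if t.2 ≤ idx then (PySem.List.insert li t.2 t.1, idx + 1, rs')
    else (PySem.List.insert li t.2 t.1, idx, rs')
  else st

def solution (n : Int) (k : Int) (cmd : List String) : String :=
  let st := cmd.foldl pvStepA (pvRange n, k, [])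
  let result := (pvRange n).map (fun _ => "X")
  let result := st.1.foldl (fun r i => PySem.List.pySetD r i "O") result
  PySem.Str.join "" result

-- ===== PORT B =====
-- `below` and `above` are stored with the Python list's END at the Lean list's HEAD,
-- so Python's append/pop at the end is cons/uncons here.

-- _seek's first while loop: move the cursor m rows down
def pvSeekDown : Nat → List Int × List Int → List Int × List Int
  | 0, s => s
  | m + 1, (ab, bl) =>
    match bl with
    | [] => (ab, [])          -- Python below.pop() raises here: unreachable under Pre_
    | v :: bl' => pvSeekDown m (v :: ab, bl')

-- _seek's second while loop: move the cursor m rows up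
def pvSeekUp : Nat → List Int × List Int → List Int × List Int
  | 0, s => s
  | m + 1, (ab, bl) =>
    match ab with
    | [] => ([], bl)          -- Python above.pop() raises here: unreachable under Pre_
    | a :: ab' => pvSeekUp m (ab', a :: bl)

def pvSeek (d : Int) (s : List Int × List Int) : List Int × List Int :=
  if 0 ≤ d then pvSeekDown d.toNat s else pvSeekUp (-d).toNat s

-- one iteration of B's loop over the state (above, below, pend, dead)
def pvStepB (st : List Int × List Int × Int × List (Int × Int)) (cm : String) :
    List Int × List Int × Int × List (Int × Int) :=
  let ab := st.1
  let bl := st.2.1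
  let pend := st.2.2.1
  let dl := st.2.2.2
  let parts := (PySem.Str.split? cm " ").getD []
  let c0 := PySem.List.pyGetD parts 0 ""
  if c0 = "U" then
    (ab, bl, pend - ((PySem.Int.ofStr? (PySem.List.pyGetD parts 1 "")).getD 0), dl)
  else if c0 = "D" then
    (ab, bl, pend + ((PySem.Int.ofStr? (PySem.List.pyGetD parts 1 "")).getD 0), dl)
  else if c0 = "C" then
    let s1 := pvSeek pend (ab, bl)
    match s1.2 with
    | [] => (s1.1, [], 0, dl)  -- Python below.pop() raises here: unreachable under Pre_
    | v :: rest =>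
      let dl' := (v, (s1.1.length : Int)) :: dl
      if rest.isEmpty then
        match s1.1 with
        | [] => ([], [], 0, dl')
        | a :: ab' => (ab', [a], 0, dl')
      else (s1.1, rest, 0, dl')
  else if c0 = "Z" then
    let s1 := pvSeek pend (ab, bl)
    match dl with
    | [] => (s1.1, s1.2, 0, dl)  -- Python dead.pop() raises here: unreachable under Pre_
    | (v, p) :: dl' =>
      if p ≤ (s1.1.length : Int) then
        -- above.insert(p, v): index from the Python end is len(above) - p
        (s1.1.insertIdx (s1.1.length - p.toNat) v, s1.2, 0, dl')
      else
        -- below.insert(len(below) - (p - len(above)), v): index from the Python end is p - len(above)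
        (s1.1, s1.2.insertIdx (p - (s1.1.length : Int)).toNat v, 0, dl')
  else st

def solution_alt (n : Int) (k : Int) (cmd : List String) : String :=
  -- below = list(range(n-1, -1, -1)), stored reversed (head = cursor row)
  let st := cmd.foldl pvStepB ([], (PySem.List.pyRange (n - 1) (-1) (-1)).reverse, k, [])
  let out := List.replicate n.toNat "O"  -- ["O"] * n
  -- `for v, _ in dead` iterates the Python list front-to-back, i.e. our list reversed
  let out := (st.2.2.2.reverse).foldl (fun r t => PySem.List.pySetD r t.1 "X") out
  PySem.Str.join "" out

-- ===== PRECONDITION & SPEC =====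
-- Pre_ is the problem's stated input guarantee, checked over the commands with only the
-- cursor position, the table size and the recorded delete positions (never the table
-- contents): every "U x"/"D x" carries an int, every "C"/"Z" happens with the cursor on
-- the table and every "Z" has a matching earlier "C".  It DOES exclude some inputs on
-- which A still returns: command sequences that park the cursor off the table at a
-- delete/restore, where A's value relies on Python negative-index wraparound or clamped
-- inserts (and B's zipper raises); see the claim's cites.
def pvPreStep (st : Option (Int × Int × List Int)) (cm : String) : Option (Int × Int × List Int) :=
  match st with
  | none => none
  | some (pos, size, ps) =>
    let parts := (PySem.Str.split? cm " ").getD []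
    let c0 := PySem.List.pyGetD parts 0 ""
    if c0 = "U" ∨ c0 = "D" then
      match PySem.Int.ofStr? (PySem.List.pyGetD parts 1 "") with
      | none => none
      | some x => some ((if c0 = "U" then pos - x else pos + x), size, ps)
    else if c0 = "C" then
      if 0 ≤ pos ∧ pos < size then
        some ((if pos = size - 1 then pos - 1 else pos), size - 1, pos :: ps)
      else none
    else if c0 = "Z" then
      match ps with
      | [] => none
      | p :: ps' =>
        if 1 ≤ size ∧ 0 ≤ pos ∧ pos ≤ size then
          some ((if p ≤ pos then pos + 1 else pos), size + 1, ps')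
        else none
    else st

def Pre_solution (n : Int) (k : Int) (cmd : List String) : Prop :=
  cmd.foldl pvPreStep (some (k, n, [])) ≠ none

instance (n : Int) (k : Int) (cmd : List String) : Decidable (Pre_solution n k cmd) := by
  unfold Pre_solution; infer_instance

def pvWitness_solution : Int × Int × List String := (3, 0, ["D 2", "C", "Z", "U 1", "C"])

def Spec_solution (n : Int) (k : Int) (cmd : List String) (out : String) : Prop := out = solution_alt n k cmd
instance (n : Int) (k : Int) (cmd : List String) (out : String) : Decidable (Spec_solution n k cmd out) := by unfold Spec_solution; infer_instance

-- ===== CLAIM (what is proved, stated in full; the proofs are below) =====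
def Claim_equal_solution : Prop := ∀ (n : Int) (k : Int) (cmd : List String), Dom_solution n k cmd → Pre_solution n k cmd → Spec_solution n k cmd (solution n k cmd)

-- ===== LEMMAS AND PROOFS =====

theorem pvPre_none (cmd : List String) : cmd.foldl pvPreStep none = none := by
  induction cmd with
  | nil => rfl
  | cons c t ih => simpa [pvPreStep] using ih

theorem pvInsertIdx_eq {α : Type} (l : List α) (i : Nat) (h : i ≤ l.length) (v : α) :
    l.insertIdx i v = l.take i ++ v :: l.drop i := by
  induction l generalizing i with
  | nil => cases i with
    | zero => simp
    | succ j => simp at h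
  | cons x t ih =>
    cases i with
    | zero => simp
    | succ j => simp [List.insertIdx_succ_cons, ih j (by simpa using h)]

theorem pvInsertIdx_reverse {α : Type} (l : List α) (i : Nat) (h : i ≤ l.length) (v : α) :
    (l.insertIdx i v).reverse = l.reverse.insertIdx (l.length - i) v := by
  rw [pvInsertIdx_eq _ _ h, pvInsertIdx_eq _ _ (by simp)]
  rw [List.reverse_append, List.reverse_cons]
  rw [List.reverse_take, List.reverse_drop]
  have h1 : l.reverse.take (l.length - i) = (l.drop i).reverse := (List.reverse_drop).symm
  have h2 : l.reverse.drop (l.length - i) = (l.take i).reverse := (List.reverse_take).symm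
  rw [h1, h2]
  simp

theorem pvEraseIdx_mid {α : Type} (pre rest : List α) (v : α) :
    (pre ++ v :: rest).eraseIdx pre.length = pre ++ rest := by
  induction pre with
  | nil => simp
  | cons x t ih => simpa using ih

theorem pvGetD_mid (pre rest : List Int) (v d : Int) :
    PySem.List.pyGetD (pre ++ v :: rest) ((pre.length : Int)) d = v := by
  rw [PySem.List.pyGetD_natCast]
  simp [List.getD_eq_getElem?_getD, List.getElem?_append_right]

theorem pvSeekDown_spec (m : Nat) : ∀ (ab bl : List Int), m ≤ bl.length →
    pvSeekDown m (ab, bl) = ((bl.take m).reverse ++ ab, bl.drop m) := by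
  induction m with
  | zero => intro ab bl _; simp [pvSeekDown]
  | succ j ih =>
    intro ab bl h
    cases bl with
    | nil => simp at h
    | cons v bl' =>
      have := ih (v :: ab) bl' (by simpa using h)
      simp [pvSeekDown, this]

theorem pvSeekUp_spec (m : Nat) : ∀ (ab bl : List Int), m ≤ ab.length →
    pvSeekUp m (ab, bl) = (ab.drop m, (ab.take m).reverse ++ bl) := by
  induction m with
  | zero => intro ab bl _; simp [pvSeekUp]
  | succ j ih =>
    intro ab bl h
    cases ab with
    | nil => simp at h
    | cons a ab' =>
      have := ih ab' (a :: bl) (by simpa using h)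
      simp [pvSeekUp, this]

theorem pvSeek_spec (ab bl : List Int) (pend : Int)
    (h0 : 0 ≤ (ab.length : Int) + pend)
    (h1 : (ab.length : Int) + pend ≤ (ab.length : Int) + (bl.length : Int)) :
    (pvSeek pend (ab, bl)).1.reverse ++ (pvSeek pend (ab, bl)).2 = ab.reverse ++ bl ∧
    ((pvSeek pend (ab, bl)).1.length : Int) = (ab.length : Int) + pend := by
  unfold pvSeek
  by_cases hd : 0 ≤ pend
  · have hm : pend.toNat ≤ bl.length := by omega
    rw [if_pos hd, pvSeekDown_spec _ _ _ hm]
    constructor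
    · simp [List.reverse_append]
    · simp [List.length_take, Nat.min_eq_left hm]; omega
  · have hm : (-pend).toNat ≤ ab.length := by omega
    rw [if_neg hd, pvSeekUp_spec _ _ _ hm]
    constructor
    · conv_rhs => rw [← List.take_append_drop ((-pend).toNat) ab]
      rw [List.reverse_append]
      simp
    · simp [List.length_drop]; omega

theorem pvFoldSet_getElem? (xs : List Int) (base : List String) (v : String)
    (hx : ∀ i ∈ xs, 0 ≤ i ∧ i < (base.length : Int)) (j : Nat) :
    (xs.foldl (fun r i => PySem.List.pySetD r i v) base)[j]? =
      if (j : Int) ∈ xs then some v else base[j]? := by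
  induction xs generalizing base with
  | nil => simp
  | cons i t ih =>
    have hi := hx i (by simp)
    have hlen : (PySem.List.pySetD base i v).length = base.length := PySem.List.length_pySetD _ _ _
    have hrest : ∀ x ∈ t, 0 ≤ x ∧ x < ((PySem.List.pySetD base i v).length : Int) := by
      intro x hxm
      have h' := hx x (List.mem_cons_of_mem _ hxm)
      simpa only [hlen] using h' 
    rw [List.foldl_cons, ih _ hrest]
    by_cases hjt : (j : Int) ∈ t
    · simp [hjt]
    · have hset : (PySem.List.pySetD base i v)[j]? = if i.toNat = j then some v else base[j]? := by
        rw [PySem.List.pySetD_of_nonneg _ _ hi.1]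
        exact List.getElem?_set_of_lt' v base (show i.toNat < base.length by omega)
      rw [hset]
      by_cases hij : (j : Int) = i
      · have : i.toNat = j := by omega
        simp [hij, this, hjt]
      · have : ¬ i.toNat = j := by omega
        simp [this, hjt, hij, List.mem_cons]



-- stack of recorded delete positions: each is a valid position of the table it will be restored into
def pvSzOK (m : Int) (l : List Int) : Prop :=
  match l with
  | [] => True
  | p :: t => 0 ≤ p ∧ p ≤ m ∧ pvSzOK (m + 1) t

-- the simulation relation between A's state, B's state and the Pre_ fold state
def pvRel (n : Int) (a : List Int × Int × List (Int × Int))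
    (b : List Int × List Int × Int × List (Int × Int)) (f : Int × Int × List Int) : Prop :=
  a.2.1 = f.1 ∧
  a.1 = b.1.reverse ++ b.2.1 ∧
  b.2.2.2 = a.2.2.reverse ∧
  f.2.2 = (a.2.2.map Prod.snd).reverse ∧
  (a.1 ++ a.2.2.map Prod.fst).Perm (pvRange n) ∧
  pvSzOK f.2.1 f.2.2 ∧
  ( (f.2.1 = (a.1.length : Int) ∧
      (f.1 = (b.1.length : Int) + b.2.2.1 ∨
       (f.2.1 = 0 ∧ b.1 = [] ∧ b.2.1 = [] ∧ f.1 = b.2.2.1 - 1)))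
    ∨ (f.2.1 < 0 ∧ a.1 = [] ∧ b.1 = [] ∧ b.2.1 = [] ∧ a.2.2 = [] ∧ f.1 = (b.1.length : Int) + b.2.2.1) )

theorem pvPermStep (pre rest more : List Int) (v : Int) :
    ((pre ++ rest) ++ (more ++ [v])).Perm ((pre ++ v :: rest) ++ more) := by
  have h1 : ((pre ++ rest) ++ (more ++ [v])).Perm (v :: ((pre ++ rest) ++ more)) := by
    rw [← List.append_assoc]
    exact List.perm_append_singleton v _
  have h2 : ((pre ++ v :: rest) ++ more).Perm (v :: ((pre ++ rest) ++ more)) := by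
    have hm : (pre ++ v :: rest).Perm (v :: (pre ++ rest)) := List.perm_middle
    exact (List.perm_append_right_iff more).mpr hm
  exact h1.trans h2.symm

theorem pvStep_rel (n : Int) (a : List Int × Int × List (Int × Int))
    (b : List Int × List Int × Int × List (Int × Int)) (f f1 : Int × Int × List Int)
    (hrel : pvRel n a b f) (hstep : pvPreStep (some f) cm = some f1) :
    pvRel n (pvStepA a cm) (pvStepB b cm) f1 := by
  obtain ⟨li, idx, rs⟩ := a
  obtain ⟨ab, bl, pend, dl⟩ := b
  obtain ⟨pos, size, ps⟩ := f
  unfold pvRel at hrel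
  dsimp only at hrel
  obtain ⟨h1, h2, h3, h4, h5, h6, h7⟩ := hrel
  by_cases hU : PySem.List.pyGetD ((PySem.Str.split? cm " ").getD []) 0 "" = "U"
  · -- "U x"
    cases hx : PySem.Int.ofStr? (PySem.List.pyGetD ((PySem.Str.split? cm " ").getD []) 1 "") with
    | none => simp [pvPreStep, hU, hx] at hstep
    | some x =>
      have hf1 : f1 = (pos - x, size, ps) := by
        simp [pvPreStep, hU, hx] at hstep
        exact hstep.symm
      have hA : pvStepA (li, idx, rs) cm = (li, idx - x, rs) := by
        unfold pvStepA; rw [if_pos hU, hx]; rfl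
      have hB : pvStepB (ab, bl, pend, dl) cm = (ab, bl, pend - x, dl) := by
        unfold pvStepB; rw [if_pos hU, hx]; rfl
      rw [hA, hB, hf1]
      exact ⟨by dsimp only; omega, h2, h3, h4, h5, h6, by
        rcases h7 with ⟨hs, hp | ⟨h0, hab, hbl, hp⟩⟩ | ⟨hneg, ha, hab, hbl, hrs, hp⟩
        · exact Or.inl ⟨hs, Or.inl (by dsimp only; omega)⟩
        · exact Or.inl ⟨hs, Or.inr ⟨h0, hab, hbl, by dsimp only; omega⟩⟩
        · exact Or.inr ⟨hneg, ha, hab, hbl, hrs, by dsimp only; omega⟩⟩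
  · by_cases hD : PySem.List.pyGetD ((PySem.Str.split? cm " ").getD []) 0 "" = "D"
    · -- "D x"
      cases hx : PySem.Int.ofStr? (PySem.List.pyGetD ((PySem.Str.split? cm " ").getD []) 1 "") with
      | none => simp [pvPreStep, hU, hD, hx] at hstep
      | some x =>
        have hf1 : f1 = (pos + x, size, ps) := by
          simp [pvPreStep, hU, hD, hx] at hstep
          exact hstep.symm
        have hA : pvStepA (li, idx, rs) cm = (li, idx + x, rs) := by
          unfold pvStepA; rw [if_neg hU, if_pos hD, hx]; rfl
        have hB : pvStepB (ab, bl, pend, dl) cm = (ab, bl, pend + x, dl) := by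
          unfold pvStepB; rw [if_neg hU, if_pos hD, hx]; rfl
        rw [hA, hB, hf1]
        exact ⟨by dsimp only; omega, h2, h3, h4, h5, h6, by
          rcases h7 with ⟨hs, hp | ⟨h0, hab, hbl, hp⟩⟩ | ⟨hneg, ha, hab, hbl, hrs, hp⟩
          · exact Or.inl ⟨hs, Or.inl (by dsimp only; omega)⟩
          · exact Or.inl ⟨hs, Or.inr ⟨h0, hab, hbl, by dsimp only; omega⟩⟩
          · exact Or.inr ⟨hneg, ha, hab, hbl, hrs, by dsimp only; omega⟩⟩
    · by_cases hC : PySem.List.pyGetD ((PySem.Str.split? cm " ").getD []) 0 "" = "C"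
      · -- "C"
        have hpos : 0 ≤ pos ∧ pos < size := by
          by_contra hc
          simp [pvPreStep, hU, hD, hC, hc] at hstep
        have hf1 : f1 = ((if pos = size - 1 then pos - 1 else pos), size - 1, pos :: ps) := by
          simp [pvPreStep, hU, hD, hC, hpos] at hstep
          exact hstep.symm
        have hlive : size = (li.length : Int) ∧ pos = (ab.length : Int) + pend := by
          rcases h7 with ⟨hs, hp | ⟨h0, _, _, _⟩⟩ | ⟨hneg, _⟩
          · exact ⟨hs, hp⟩
          · exact absurd hpos (by omega)
          · exact absurd hpos (by omega)
        obtain ⟨hsize, hpend⟩ := hlive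
        have hlen2 : (li.length : Int) = (ab.length : Int) + (bl.length : Int) := by
          simp [h2]
        obtain ⟨hseq, hslen⟩ := pvSeek_spec ab bl pend (by omega) (by omega)
        rcases hsk : pvSeek pend (ab, bl) with ⟨ab1, bl1⟩
        rw [hsk] at hseq hslen
        dsimp only at hseq hslen
        have hslen' : ((ab1.length : Nat) : Int) = pos := by omega
        have hli2 : li = ab1.reverse ++ bl1 := by rw [hseq, ← h2]
        have hlensum : li.length = ab1.length + bl1.length := by rw [hli2]; simp
        cases hbl2 : bl1 with
        | nil => rw [hbl2] at hlensum; simp at hlensum; omega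
        | cons v rest =>
        rw [hbl2] at hli2 hlensum
        by_cases hlast : pos = size - 1
        · -- deleting the last row
          have hrest : rest = [] := by
            apply List.eq_nil_iff_length_eq_zero.mpr
            simp at hlensum; omega
          subst hrest
          have hliX : li = ab1.reverse ++ [v] := hli2
          have hidxlast : idx = (li.length : Int) - 1 := by omega
          have hgetlast : PySem.List.pyGetD li (-1) 0 = v := by
            rw [hliX]; exact PySem.List.pyGetD_neg_one_append_singleton _ _ _
          have hA : pvStepA (li, idx, rs) cm = (li.dropLast, idx - 1, rs ++ [(v, idx)]) := by
            unfold pvStepA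
            rw [if_neg hU, if_neg hD, if_pos hC, if_pos hidxlast, hgetlast]
          have hdropl : li.dropLast = ab1.reverse := by
            rw [hliX]; exact List.dropLast_concat
          have hf1' : f1 = (pos - 1, size - 1, pos :: ps) := by rw [hf1, if_pos hlast]
          have hperm' : (li.dropLast ++ (rs ++ [(v, idx)]).map Prod.fst).Perm (pvRange n) := by
            rw [hdropl, List.map_append]
            refine List.Perm.trans ?_ h5
            have := pvPermStep ab1.reverse [] (rs.map Prod.fst) v
            simp only [List.append_nil] at this
            rw [hliX]
            simpa using this
          have hszok : pvSzOK (size - 1) (pos :: ps) := by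
            refine ⟨hpos.1, by omega, ?_⟩
            have he : size - 1 + 1 = size := by ring
            rw [he]; exact h6
          cases hab2 : ab1 with
          | nil =>
            have hB : pvStepB (ab, bl, pend, dl) cm = ([], [], 0, (v, 0) :: dl) := by
              unfold pvStepB
              rw [if_neg hU, if_neg hD, if_pos hC]
              dsimp only
              rw [hsk, hbl2, hab2]
              rfl
            rw [hA, hB, hf1']
            have hpos0 : pos = 0 := by rw [hab2] at hslen'; simpa using hslen'.symm
            have hsz1 : li.length = 1 := by rw [hab2] at hlensum; simpa using hlensum
            unfold pvRel
            dsimp only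
            refine ⟨by omega, ?_, ?_, ?_, hperm', hszok, ?_⟩
            · rw [hdropl, hab2]; simp
            · rw [List.reverse_append, h3, h1, hpos0]; rfl
            · rw [List.map_append, List.reverse_append, h4, h1]; rfl
            · left
              refine ⟨?_, Or.inr ⟨?_, rfl, rfl, by omega⟩⟩
              · rw [hdropl, hab2]; simp; omega
              · omega
          | cons aa ab' =>
            have hB : pvStepB (ab, bl, pend, dl) cm =
                (ab', [aa], 0, (v, (ab1.length : Int)) :: dl) := by
              unfold pvStepB
              rw [if_neg hU, if_neg hD, if_pos hC]
              dsimp only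
              rw [hsk, hbl2, hab2]
              rfl
            rw [hA, hB, hf1']
            have hab1len : ab1.length = ab'.length + 1 := by rw [hab2]; rfl
            unfold pvRel
            dsimp only
            refine ⟨by omega, ?_, ?_, ?_, hperm', hszok, ?_⟩
            · rw [hdropl, hab2]; simp
            · rw [List.reverse_append, h3, h1, ← hslen']; rfl
            · rw [List.map_append, List.reverse_append, h4, h1]; rfl
            · left
              constructor
              · rw [hdropl, hab2]; simp; omega
              · left; omega
        · -- deleting a row that is not the last one
          have hrne : rest ≠ [] := by
            intro hre
            rw [hre] at hlensum; simp at hlensum; omega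
          have hidx' : ¬ idx = (li.length : Int) - 1 := by omega
          have hidxN : idx = ((ab1.reverse.length : Nat) : Int) := by simp; omega
          have hget : PySem.List.pyGetD li idx 0 = v := by
            rw [hli2, hidxN]; exact pvGetD_mid _ _ _ _
          have herase : li.eraseIdx idx.toNat = ab1.reverse ++ rest := by
            have ht : idx.toNat = ab1.reverse.length := by simp; omega
            rw [hli2, ht]; exact pvEraseIdx_mid _ _ _
          have hA : pvStepA (li, idx, rs) cm =
              (ab1.reverse ++ rest, idx, rs ++ [(v, idx)]) := by
            unfold pvStepA
            rw [if_neg hU, if_neg hD, if_pos hC, if_neg hidx', hget, herase]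
          have hB : pvStepB (ab, bl, pend, dl) cm =
              (ab1, rest, 0, (v, (ab1.length : Int)) :: dl) := by
            unfold pvStepB
            rw [if_neg hU, if_neg hD, if_pos hC]
            dsimp only
            rw [hsk, hbl2]
            dsimp only
            rw [if_neg (by simpa using hrne)]
          have hf1' : f1 = (pos, size - 1, pos :: ps) := by rw [hf1, if_neg hlast]
          rw [hA, hB, hf1']
          have hperm' : ((ab1.reverse ++ rest) ++ (rs ++ [(v, idx)]).map Prod.fst).Perm (pvRange n) := by
            rw [List.map_append]
            refine List.Perm.trans (pvPermStep ab1.reverse rest (rs.map Prod.fst) v) ?_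
            rw [← hli2]
            exact h5
          have hszok : pvSzOK (size - 1) (pos :: ps) := by
            refine ⟨hpos.1, by omega, ?_⟩
            have he : size - 1 + 1 = size := by ring
            rw [he]; exact h6
          have hlc : (v :: rest).length = rest.length + 1 := by simp
          unfold pvRel
          dsimp only
          refine ⟨h1, rfl, ?_, ?_, hperm', hszok, ?_⟩
          · rw [List.reverse_append, h3, h1, ← hslen']; rfl
          · rw [List.map_append, List.reverse_append, h4, h1]; rfl
          · left
            constructor
            · simp; omega
            · left; omega
      · by_cases hZ : PySem.List.pyGetD ((PySem.Str.split? cm " ").getD []) 0 "" = "Z"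
        · -- "Z"
          cases hdl : dl with
          | nil =>
            have hrs : rs = [] := by
              have := congrArg List.reverse h3
              rw [hdl] at this; simpa using this.symm
            have hps : ps = [] := by rw [h4, hrs]; rfl
            rw [hps] at hstep
            simp [pvPreStep, hU, hD, hC, hZ] at hstep
          | cons t0 dl'' =>
          obtain ⟨v, q⟩ := t0
          have hrs : rs = dl''.reverse ++ [(v, q)] := by
            have := congrArg List.reverse h3
            rw [hdl] at this
            simpa using this.symm
          have hps : ps = q :: dl''.map Prod.snd := by
            rw [h4, hrs]; simp
          have hcond : 1 ≤ size ∧ 0 ≤ pos ∧ pos ≤ size := by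
            by_contra hc
            rw [hps] at hstep
            simp [pvPreStep, hU, hD, hC, hZ, hc] at hstep
          have hf1 : f1 = ((if q ≤ pos then pos + 1 else pos), size + 1,
              dl''.map Prod.snd) := by
            rw [hps] at hstep
            simp [pvPreStep, hU, hD, hC, hZ, hcond] at hstep
            exact hstep.symm
          have hlive : size = (li.length : Int) ∧ pos = (ab.length : Int) + pend := by
            rcases h7 with ⟨hs, hp | ⟨h0, _, _, _⟩⟩ | ⟨hneg, _⟩
            · exact ⟨hs, hp⟩
            · exact absurd hcond (by omega)
            · exact absurd hcond (by omega)
          obtain ⟨hsize, hpend⟩ := hlive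
          have hszq : 0 ≤ q ∧ q ≤ size ∧ pvSzOK (size + 1) (dl''.map Prod.snd) := by
            have h6' := h6
            rw [hps] at h6'
            exact h6'
          have hlen2 : (li.length : Int) = (ab.length : Int) + (bl.length : Int) := by
            simp [h2]
          obtain ⟨hseq, hslen⟩ := pvSeek_spec ab bl pend (by omega) (by omega)
          rcases hsk : pvSeek pend (ab, bl) with ⟨ab1, bl1⟩
          rw [hsk] at hseq hslen
          dsimp only at hseq hslen
          have hslen' : ((ab1.length : Nat) : Int) = pos := by omega
          have hli2 : li = ab1.reverse ++ bl1 := by rw [hseq, ← h2]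
          have hlensum : li.length = ab1.length + bl1.length := by rw [hli2]; simp
          have hgett : PySem.List.pyGetD rs (-1) (0, 0) = (v, q) := by
            rw [hrs]; exact PySem.List.pyGetD_neg_one_append_singleton _ _ _
          have hdropt : rs.dropLast = dl''.reverse := by
            rw [hrs]; exact List.dropLast_concat
          have hq : ((q.toNat : Nat) : Int) = q := by omega
          have hqlen : q.toNat ≤ li.length := by omega
          have hins : PySem.List.insert li q v = li.take q.toNat ++ v :: li.drop q.toNat := by
            rw [← hq]; exact PySem.List.insert_natCast li q.toNat v hqlen
          have hpermQ : ((li.take q.toNat ++ v :: li.drop q.toNat) ++ (dl''.reverse).map Prod.fst).Perm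
              (pvRange n) := by
            refine List.Perm.trans (pvPermStep (li.take q.toNat) (li.drop q.toNat)
              ((dl''.reverse).map Prod.fst) v).symm ?_
            rw [List.take_append_drop]
            refine List.Perm.trans ?_ h5
            rw [hrs, List.map_append]
            simp
          have hlenins : (li.take q.toNat ++ v :: li.drop q.toNat).length = li.length + 1 := by
            simp
          by_cases hqp : q ≤ pos
          · -- restored row lands above the cursor
            have hA : pvStepA (li, idx, rs) cm =
                (li.take q.toNat ++ v :: li.drop q.toNat, idx + 1, dl''.reverse) := by
              unfold pvStepA
              rw [if_neg hU, if_neg hD, if_neg hC, if_pos hZ]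
              dsimp only
              rw [hgett, hdropt]
              dsimp only
              rw [if_pos (by omega : q ≤ idx), hins]
            have hqab : q ≤ ((ab1.length : Nat) : Int) := by omega
            have hB : pvStepB (ab, bl, pend, (v, q) :: dl'') cm =
                (ab1.insertIdx (ab1.length - q.toNat) v, bl1, 0, dl'') := by
              unfold pvStepB
              rw [if_neg hU, if_neg hD, if_neg hC, if_pos hZ]
              dsimp only
              rw [hsk]
              dsimp only
              rw [if_pos hqab]
            rw [hA, hB, hf1, if_pos hqp]
            have hqn : q.toNat ≤ ab1.length := by omega
            have habX : (ab1.insertIdx (ab1.length - q.toNat) v).reverse =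
                ab1.reverse.insertIdx q.toNat v := by
              rw [pvInsertIdx_reverse ab1 (ab1.length - q.toNat) (by omega) v]
              congr 1
              omega
            have hkey : (ab1.insertIdx (ab1.length - q.toNat) v).reverse ++ bl1 =
                li.take q.toNat ++ v :: li.drop q.toNat := by
              rw [habX, pvInsertIdx_eq ab1.reverse q.toNat (by simpa using hqn) v]
              rw [hli2, List.take_append_of_le_length (by simpa using hqn),
                List.drop_append_of_le_length (by simpa using hqn)]
              simp [List.append_assoc]
            have hlenins2 : (ab1.insertIdx (ab1.length - q.toNat) v).length = ab1.length + 1 :=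
              List.length_insertIdx_of_le_length (by omega) v
            unfold pvRel
            dsimp only
            refine ⟨by omega, ?_, ?_, by simp, hpermQ, hszq.2.2, ?_⟩
            · rw [hkey]
            · simp
            · left
              constructor
              · rw [hlenins]; omega
              · left; rw [hlenins2]; omega
          · -- restored row lands below the cursor
            have hA : pvStepA (li, idx, rs) cm =
                (li.take q.toNat ++ v :: li.drop q.toNat, idx, dl''.reverse) := by
              unfold pvStepA
              rw [if_neg hU, if_neg hD, if_neg hC, if_pos hZ]
              dsimp only
              rw [hgett, hdropt]
              dsimp only
              rw [if_neg (by omega : ¬ q ≤ idx), hins]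
            have hqab : ¬ q ≤ ((ab1.length : Nat) : Int) := by omega
            have hB : pvStepB (ab, bl, pend, (v, q) :: dl'') cm =
                (ab1, bl1.insertIdx (q - (ab1.length : Int)).toNat v, 0, dl'') := by
              unfold pvStepB
              rw [if_neg hU, if_neg hD, if_neg hC, if_pos hZ]
              dsimp only
              rw [hsk]
              dsimp only
              rw [if_neg hqab]
            rw [hA, hB, hf1, if_neg hqp]
            have hm : (q - (ab1.length : Int)).toNat ≤ bl1.length := by omega
            have hqsplit : q.toNat = ab1.reverse.length + (q - (ab1.length : Int)).toNat := by
              simp; omega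
            have hkey : ab1.reverse ++ bl1.insertIdx ((q - (ab1.length : Int)).toNat) v =
                li.take q.toNat ++ v :: li.drop q.toNat := by
              rw [hli2, hqsplit, List.take_length_add_append, List.drop_length_add_append,
                pvInsertIdx_eq bl1 _ hm v]
              simp [List.append_assoc]
            unfold pvRel
            dsimp only
            refine ⟨h1, ?_, ?_, by simp, hpermQ, hszq.2.2, ?_⟩
            · rw [hkey]
            · simp
            · left
              constructor
              · rw [hlenins]; omega
              · left; omega
        · -- any other command is ignored
          have hf1 : f1 = (pos, size, ps) := by
            simp [pvPreStep, hU, hD, hC, hZ] at hstep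
            exact hstep.symm
          have hA : pvStepA (li, idx, rs) cm = (li, idx, rs) := by
            unfold pvStepA
            rw [if_neg hU, if_neg hD, if_neg hC, if_neg hZ]
          have hB : pvStepB (ab, bl, pend, dl) cm = (ab, bl, pend, dl) := by
            unfold pvStepB
            rw [if_neg hU, if_neg hD, if_neg hC, if_neg hZ]
          rw [hA, hB, hf1]
          exact ⟨h1, h2, h3, h4, h5, h6, h7⟩

theorem pvLoop (n : Int) (cmd : List String) :
    ∀ a b f, pvRel n a b f → cmd.foldl pvPreStep (some f) ≠ none →
    ∃ f', cmd.foldl pvPreStep (some f) = some f' ∧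
      pvRel n (cmd.foldl pvStepA a) (cmd.foldl pvStepB b) f' := by
  induction cmd with
  | nil => exact fun a b f hrel _ => ⟨f, rfl, hrel⟩
  | cons c t ih =>
    intro a b f hrel hnn
    rw [List.foldl_cons] at hnn ⊢
    cases hs : pvPreStep (some f) c with
    | none => rw [hs] at hnn; exact absurd (pvPre_none t) hnn
    | some f1 =>
      rw [hs] at hnn
      simpa using ih (pvStepA a c) (pvStepB b c) f1 (pvStep_rel n a b f f1 hrel hs) hnn

theorem pvOut_eq (n : Int) (a : List Int × Int × List (Int × Int))
    (b : List Int × List Int × Int × List (Int × Int)) (f : Int × Int × List Int)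
    (hrel : pvRel n a b f) :
    PySem.Str.join "" (a.1.foldl (fun r i => PySem.List.pySetD r i "O") ((pvRange n).map (fun _ => "X"))) =
    PySem.Str.join "" (List.replicate n.toNat "O"
      |> (b.2.2.2.reverse).foldl (fun r t => PySem.List.pySetD r t.1 "X")) := by
  obtain ⟨li, idx, rs⟩ := a
  obtain ⟨ab, bl, pend, dl⟩ := b
  obtain ⟨-, -, h3, -, h5, -, -⟩ := hrel
  dsimp only at h3 h5 ⊢
  -- fold over the pairs = fold over the recorded rows
  have hdl : dl.reverse = rs := by rw [h3, List.reverse_reverse]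
  rw [hdl, show (rs.foldl (fun r t => PySem.List.pySetD r t.1 "X") (List.replicate n.toNat "O")) =
      ((rs.map Prod.fst).foldl (fun r i => PySem.List.pySetD r i "X") (List.replicate n.toNat "O"))
    from (List.foldl_map (f := Prod.fst) (g := fun r i => PySem.List.pySetD r i "X")
      (l := rs) (init := List.replicate n.toNat "O")).symm]
  congr 1
  have hmem : ∀ i : Int, i ∈ li ∨ i ∈ rs.map Prod.fst → 0 ≤ i ∧ i < n := by
    intro i hi
    have : i ∈ li ++ rs.map Prod.fst := by
      rcases hi with h | h
      · exact List.mem_append_left _ h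
      · exact List.mem_append_right _ h
    have := h5.mem_iff.mp this
    exact PySem.List.mem_pyRange_one.mp this
  have hlenX : ((pvRange n).map (fun _ => "X")).length = n.toNat := by
    simp [pvRange, PySem.List.length_pyRange_one]
  have hlenO : (List.replicate n.toNat "O").length = n.toNat := by simp
  have hnd : (li ++ rs.map Prod.fst).Nodup := h5.symm.nodup (PySem.List.nodup_pyRange_one 0 n)
  apply List.ext_getElem?
  intro j
  rw [pvFoldSet_getElem? li _ _ (by intro i hi; have := hmem i (Or.inl hi); omega) j,
      pvFoldSet_getElem? (rs.map Prod.fst) _ _ (by intro i hi; have := hmem i (Or.inr hi); omega) j]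
  by_cases hj : j < n.toNat
  · have hjr : (j : Int) ∈ pvRange n := by
      apply PySem.List.mem_pyRange_one.mpr; omega
    have hjm : (j : Int) ∈ li ++ rs.map Prod.fst := h5.mem_iff.mpr hjr
    have hdisj := (List.nodup_append.mp hnd).2.2
    by_cases hli : (j : Int) ∈ li
    · have hnr : (j : Int) ∉ rs.map Prod.fst := by
        intro hc
        exact false_of_ne (hdisj _ hli _ hc)
      rw [if_pos hli, if_neg hnr, List.getElem?_replicate]
      simp [hj]
    · have hr : (j : Int) ∈ rs.map Prod.fst := by
        rcases List.mem_append.mp hjm with h | h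
        · exact absurd h hli
        · exact h
      rw [if_neg hli, if_pos hr, List.getElem?_map]
      have hjlen : j < (pvRange n).length := by
        simp [pvRange, PySem.List.length_pyRange_one]; omega
      rw [List.getElem?_eq_getElem hjlen]
      simp [hj]
  · have h1 : (j : Int) ∉ li := fun hc => absurd (hmem _ (Or.inl hc)) (by omega)
    have h2 : (j : Int) ∉ rs.map Prod.fst := fun hc => absurd (hmem _ (Or.inr hc)) (by omega)
    rw [if_neg h1, if_neg h2,
        List.getElem?_eq_none (show ((pvRange n).map (fun _ => "X")).length ≤ j by rw [hlenX]; omega),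
        List.getElem?_eq_none (show (List.replicate n.toNat "O").length ≤ j by rw [hlenO]; omega)]

-- ===== VERDICT (by name: the statement is the Claim_ definition above) =====
theorem solution_spec : Claim_equal_solution := by
  unfold Claim_equal_solution
  intro n k cmd _ hpre
  unfold Spec_solution solution solution_alt
  have hbl0 : (PySem.List.pyRange (n - 1) (-1) (-1)).reverse = pvRange n := by
    rw [PySem.List.pyRange_neg_one_eq_reverse, List.reverse_reverse]
    norm_num [pvRange]
  rw [hbl0]
  have hrel0 : pvRel n (pvRange n, k, []) ([], pvRange n, k, []) (k, n, []) := by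
    unfold pvRel
    dsimp only
    refine ⟨rfl, by simp, rfl, rfl, by simp, trivial, ?_⟩
    by_cases hn : 0 ≤ n
    · left
      refine ⟨by simp [pvRange, PySem.List.length_pyRange_one]; omega, Or.inl (by simp)⟩
    · have hnil : pvRange n = [] := PySem.List.pyRange_one_eq_nil (by omega)
      right
      exact ⟨by omega, hnil, rfl, hnil, rfl, by simp⟩
  obtain ⟨f', _, hrel⟩ := pvLoop n cmd _ _ _ hrel0 hpre
  exact pvOut_eq n _ _ _ hrel
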